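-- pv_equiv track=rewrite | github.com/UlyanaShabunina/PythonTask4 | main.py | wordLength
-- ===== SOURCE A (Python) =====
-- def correct_character(x):
--     if not(x.isalpha() or x.isdigit()):
--         return False
--     return True
--
-- def wordLength(line):
--     result = ''
--     i = 0
--     if not correct_character(line[0]):
--         while not correct_character(line[i]):
--             result += line[i]
--             i += 1
--
--     count = 0
--     for x in line[i:]:
--         if not correct_character(x):
--             if count !=0:
--                 result += '(' + str(count) + ')'
--             result += x
--             count = 0
--         else:
--             result += x
--             count += 1
--     if count > 0:
--         result += '(' + str(count) + ')'
--     return result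
-- ===== SOURCE B (Python) =====
-- def correct_character(x):
--     if not(x.isalpha() or x.isdigit()):
--         return False
--     return True
--
-- def wordLength(line):
--     # split into maximal runs of same character class, then annotate alnum runs
--     pieces = []
--     i = 0
--     n = len(line)
--     while i < n:
--         k = correct_character(line[i])
--         j = i + 1
--         while j < n and correct_character(line[j]) == k:
--             j += 1
--         s = line[i:j]
--         pieces.append(s + '(' + str(j - i) + ')' if k else s)
--         i = j
--     return ''.join(pieces)
-- ===== Notes on version B (the rewrite author's own statement) =====
-- stated objective: alternative
-- what changed: Replaces A's single stateful pass (carrying a pending run-length counter plus a separate prefix while-loop) with a run-splitting decomposition: scan out each maximal run of same character class, annotate alphanumeric runs with their length, and join the pieces.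
import Mathlib
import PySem

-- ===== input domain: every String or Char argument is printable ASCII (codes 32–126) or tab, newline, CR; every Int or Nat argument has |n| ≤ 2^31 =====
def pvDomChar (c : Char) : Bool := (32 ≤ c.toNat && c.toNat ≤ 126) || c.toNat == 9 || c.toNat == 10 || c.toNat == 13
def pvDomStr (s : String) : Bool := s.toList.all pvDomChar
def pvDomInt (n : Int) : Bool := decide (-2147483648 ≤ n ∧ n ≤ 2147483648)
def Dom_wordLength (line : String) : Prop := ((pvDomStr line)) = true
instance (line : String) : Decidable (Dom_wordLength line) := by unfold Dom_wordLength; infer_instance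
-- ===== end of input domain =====

-- B replaces A's single stateful counting pass with a split-into-runs-then-annotate decomposition (alternative, same cost).

-- ===== PORT A =====
def correctChar (x : Char) : Bool :=
  if !(PySem.Chars.isalpha x || PySem.Chars.isdigit x) then false else true

-- A's prefix while-loop: copy characters while not correctChar.
-- (If it runs off the end Python raises IndexError; those inputs are outside Pre_.)
def wlWhile : List Char → String × List Char
  | [] => ("", [])
  | c :: cs =>
    if !correctChar c then
      let p := wlWhile cs
      (String.mk [c] ++ p.1, p.2)
    else ("", c :: cs)

-- one iteration of A's for-loop; state = (result, count)
def wlStep (st : String × Int) (x : Char) : String × Int :=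
  if !correctChar x then
    let r := if st.2 ≠ 0 then st.1 ++ "(" ++ PySem.Int.toStr st.2 ++ ")" else st.1
    (r ++ String.mk [x], 0)
  else (st.1 ++ String.mk [x], st.2 + 1)

-- A's for-loop over line[i:] followed by the final flush of count
def wlMain (pr : String × List Char) : String :=
  let fc := pr.2.foldl wlStep (pr.1, 0)
  if fc.2 > 0 then fc.1 ++ "(" ++ PySem.Int.toStr fc.2 ++ ")" else fc.1

def wordLength (line : String) : String :=
  match line.toList with
  | [] => ""   -- Python raises IndexError on line[0] here; excluded by Pre_
  | c0 :: _ =>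
    wlMain (if !correctChar c0 then wlWhile line.toList else ("", line.toList))

-- ===== PORT B =====
-- B's inner while-loop: the longest prefix whose characters have class k, and the remainder
def takeRun (k : Bool) : List Char → List Char × List Char
  | [] => ([], [])
  | c :: cs =>
    if correctChar c == k then
      let p := takeRun k cs
      (c :: p.1, p.2)
    else ([], c :: cs)

theorem takeRun_rest_length (k : Bool) : ∀ cs : List Char, (takeRun k cs).2.length ≤ cs.length := by
  intro cs
  induction cs with
  | nil => simp [takeRun]
  | cons c cs ih =>
    simp only [takeRun]
    split
    · exact Nat.le_succ_of_le ih
    · simp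

-- B's outer loop: one piece per run
def wlAlt : List Char → List String
  | [] => []
  | c :: cs =>
    let k := correctChar c
    let p := takeRun k cs
    let s := String.mk (c :: p.1)
    (if k then s ++ "(" ++ PySem.Int.toStr (1 + p.1.length) ++ ")" else s) :: wlAlt p.2
termination_by cs => cs.length
decreasing_by
  simpa using Nat.lt_succ_of_le (takeRun_rest_length (correctChar c) cs)

def wordLength_alt (line : String) : String :=
  String.join (wlAlt line.toList)

-- ===== PRECONDITION & SPEC =====
-- Pre_ excludes lines with no alphanumeric character (including ""), on which A raises IndexError.
def Pre_wordLength (line : String) : Prop := line.toList.any correctChar = true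
instance (line : String) : Decidable (Pre_wordLength line) := by unfold Pre_wordLength; infer_instance
def pvWitness_wordLength : String := "a b"

def Spec_wordLength (line : String) (out : String) : Prop := out = wordLength_alt line
instance (line : String) (out : String) : Decidable (Spec_wordLength line out) := by unfold Spec_wordLength; infer_instance

-- ===== CLAIM (what is proved, stated in full; the proofs are below) =====
def Claim_equal_wordLength : Prop := ∀ (line : String), Dom_wordLength line → Pre_wordLength line → Spec_wordLength line (wordLength line)

-- ===== LEMMAS AND PROOFS =====
theorem toList_mk (l : List Char) : (String.mk l).toList = l := Eq.symm (String.ofList_eq.mp rfl)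
theorem mk_append (l m : List Char) : String.mk l ++ String.mk m = String.mk (l ++ m) := by
  apply String.ext; simp [toList_mk]
theorem mk_nil : String.mk [] = "" := by apply String.ext; simp [toList_mk]

theorem join_foldl (l : List String) : ∀ a : String, l.foldl (· ++ ·) a = a ++ String.join l := by
  induction l with
  | nil => intro a; simp [String.join]
  | cons s l ih =>
    intro a
    rw [String.join, List.foldl_cons, List.foldl_cons, ih, ih]
    simp [String.append_assoc]

theorem join_nil : String.join ([] : List String) = "" := rfl

theorem join_cons (s : String) (l : List String) : String.join (s :: l) = s ++ String.join l := by
  rw [String.join, List.foldl_cons, join_foldl]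
  simp

theorem wlAlt_nil : wlAlt [] = [] := by rw [wlAlt]

-- A's final flush
def wlFinish (p : String × Int) : String :=
  if p.2 > 0 then p.1 ++ "(" ++ PySem.Int.toStr p.2 ++ ")" else p.1

theorem wlMain_eq (pr : String × List Char) : wlMain pr = wlFinish (pr.2.foldl wlStep (pr.1, 0)) := rfl

theorem takeRun_append (k : Bool) (cs : List Char) :
    (takeRun k cs).1 ++ (takeRun k cs).2 = cs := by
  induction cs with
  | nil => simp [takeRun]
  | cons c cs ih =>
    simp only [takeRun]
    split <;> simp [ih]

theorem takeRun_all (k : Bool) (cs : List Char) :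
    ∀ c ∈ (takeRun k cs).1, correctChar c = k := by
  induction cs with
  | nil => simp [takeRun]
  | cons c cs ih =>
    simp only [takeRun]
    split
    · rename_i h
      intro d hd
      rcases List.mem_cons.1 hd with h1 | h2
      · subst h1; exact eq_of_beq h
      · exact ih d h2
    · simp

theorem takeRun_rest_head (k : Bool) (cs : List Char) (d : Char) (rest : List Char)
    (h : (takeRun k cs).2 = d :: rest) : correctChar d ≠ k := by
  induction cs with
  | nil => simp [takeRun] at h
  | cons c cs ih =>
    simp only [takeRun] at h
    split at h
    · exact ih h
    · rename_i hne
      obtain ⟨h1, _⟩ := List.cons.inj h.symm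
      subst h1
      simpa using hne

theorem foldl_bad (r : List Char) : ∀ acc : String, (∀ c ∈ r, correctChar c = false) →
    r.foldl wlStep (acc, 0) = (acc ++ String.mk r, 0) := by
  induction r with
  | nil => intro acc _; simp [mk_nil]
  | cons c cs ih =>
    intro acc h
    have hc : correctChar c = false := h c (by simp)
    have hstep : wlStep (acc, 0) c = (acc ++ String.mk [c], 0) := by simp [wlStep, hc]
    rw [List.foldl_cons, hstep, ih _ (fun x hx => h x (by simp [hx])), String.append_assoc,
      mk_append, List.singleton_append]

theorem foldl_good (r : List Char) : ∀ (acc : String) (n : Int), (∀ c ∈ r, correctChar c = true) →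
    r.foldl wlStep (acc, n) = (acc ++ String.mk r, n + r.length) := by
  induction r with
  | nil => intro acc n _; simp [mk_nil]
  | cons c cs ih =>
    intro acc n h
    have hc : correctChar c = true := h c (by simp)
    have hstep : wlStep (acc, n) c = (acc ++ String.mk [c], n + 1) := by simp [wlStep, hc]
    rw [List.foldl_cons, hstep, ih _ _ (fun x hx => h x (by simp [hx]))]
    simp only [Prod.mk.injEq]
    constructor
    · rw [String.append_assoc, mk_append, List.singleton_append]
    · simp only [List.length_cons]; push_cast; ring

theorem main_lemma : ∀ (n : Nat) (cs : List Char), cs.length ≤ n → ∀ acc : String,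
    wlFinish (cs.foldl wlStep (acc, 0)) = acc ++ String.join (wlAlt cs) := by
  intro n
  induction n with
  | zero =>
    intro cs hcs acc
    have h0 : cs = [] := List.eq_nil_of_length_eq_zero (Nat.le_zero.1 hcs)
    subst h0
    simp [wlFinish, wlAlt, join_nil]
  | succ n ih =>
    intro cs hcs acc
    match cs with
    | [] => simp [wlFinish, wlAlt, join_nil]
    | c :: cs' =>
      have hlen : cs'.length ≤ n := Nat.succ_le_succ_iff.1 hcs
      obtain ⟨r, rest, hTR⟩ : ∃ r rest, takeRun (correctChar c) cs' = (r, rest) := ⟨_, _, rfl⟩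
      have hsplit : r ++ rest = cs' := by
        have h := takeRun_append (correctChar c) cs'; rw [hTR] at h; exact h
      have hall : ∀ x ∈ r, correctChar x = correctChar c := by
        have h := takeRun_all (correctChar c) cs'; rw [hTR] at h; exact h
      have hrestlen : rest.length ≤ n := by
        have h := takeRun_rest_length (correctChar c) cs'; rw [hTR] at h
        exact le_trans h hlen
      have hwl : wlAlt (c :: cs')
          = ((if correctChar c then String.mk (c :: r) ++ "(" ++ PySem.Int.toStr (1 + r.length) ++ ")"
              else String.mk (c :: r)) :: wlAlt rest) := by
        rw [wlAlt]
        simp only [hTR]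
      by_cases hk : correctChar c = true
      · -- alnum run
        have hstep : wlStep (acc, 0) c = (acc ++ String.mk [c], 1) := by simp [wlStep, hk]
        have hrun : r.foldl wlStep (acc ++ String.mk [c], 1)
            = (acc ++ String.mk [c] ++ String.mk r, 1 + (r.length : Int)) :=
          foldl_good r _ _ (fun x hx => by rw [hall x hx, hk])
        have hcount : (0 : Int) < 1 + (r.length : Int) := by positivity
        cases rest with
        | nil =>
          have hcs' : cs' = r := by rw [← hsplit, List.append_nil]
          subst hcs'
          rw [List.foldl_cons, hstep, hrun, hwl]
          simp only [wlFinish, hcount, if_true, hk, join_cons, wlAlt_nil, join_nil]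
          apply String.ext
          simp [toList_mk]
        | cons d rest' =>
          have hd : correctChar d = false := by
            have h := takeRun_rest_head (correctChar c) cs' d rest' (by rw [hTR])
            rw [hk] at h; simpa using h
          have hne : (1 + (r.length : Int)) ≠ 0 := by positivity
          have hstepd : wlStep (acc ++ String.mk [c] ++ String.mk r, 1 + (r.length : Int)) d
              = ((acc ++ String.mk [c] ++ String.mk r ++ "(" ++ PySem.Int.toStr (1 + (r.length : Int)) ++ ")")
                  ++ String.mk [d], 0) := by
            simp [wlStep, hd, hne, String.append_assoc]
          have hstepd0 : wlStep (acc ++ String.mk [c] ++ String.mk r ++ "(" ++ PySem.Int.toStr (1 + (r.length : Int)) ++ ")", 0) d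
              = ((acc ++ String.mk [c] ++ String.mk r ++ "(" ++ PySem.Int.toStr (1 + (r.length : Int)) ++ ")")
                  ++ String.mk [d], 0) := by
            simp [wlStep, hd]
          have hfold : (c :: cs').foldl wlStep (acc, 0)
              = (d :: rest').foldl wlStep
                  (acc ++ String.mk [c] ++ String.mk r ++ "(" ++ PySem.Int.toStr (1 + (r.length : Int)) ++ ")", 0) := by
            rw [List.foldl_cons, hstep, ← hsplit, List.foldl_append, hrun, List.foldl_cons,
              List.foldl_cons, hstepd, hstepd0]
          rw [hfold, ih (d :: rest') hrestlen, hwl, if_pos hk, join_cons]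
          apply String.ext
          simp [toList_mk]
      · -- non-alnum run
        have hk' : correctChar c = false := by simpa using hk
        have hstep : wlStep (acc, 0) c = (acc ++ String.mk [c], 0) := by simp [wlStep, hk']
        have hrun : r.foldl wlStep (acc ++ String.mk [c], 0)
            = (acc ++ String.mk [c] ++ String.mk r, 0) :=
          foldl_bad r _ (fun x hx => by rw [hall x hx, hk'])
        have hfold : (c :: cs').foldl wlStep (acc, 0)
            = rest.foldl wlStep (acc ++ String.mk [c] ++ String.mk r, 0) := by
          rw [List.foldl_cons, hstep, ← hsplit, List.foldl_append, hrun]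
        rw [hfold, ih rest hrestlen, hwl, hk']
        rw [if_neg (by simp), join_cons]
        apply String.ext
        simp [toList_mk]

theorem wlWhile_eq_takeRun (cs : List Char) :
    wlWhile cs = (String.mk (takeRun false cs).1, (takeRun false cs).2) := by
  induction cs with
  | nil => simp [wlWhile, takeRun, mk_nil]
  | cons c cs ih =>
    by_cases hk : correctChar c = true
    · simp [wlWhile, takeRun, hk, mk_nil]
    · have hk' : correctChar c = false := by simpa using hk
      simp only [wlWhile, takeRun, hk', Bool.not_false, if_true, beq_self_eq_true, ih]
      simp only [Prod.mk.injEq]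
      refine ⟨?_, trivial⟩
      apply String.ext
      simp [toList_mk]

-- ===== VERDICT (by name: the statement is the Claim_ definition above) =====
theorem wordLength_spec : Claim_equal_wordLength := by
  unfold Claim_equal_wordLength
  intro line _ _
  unfold Spec_wordLength wordLength wordLength_alt
  cases hcs : line.toList with
  | nil => simp [wlAlt, join_nil]
  | cons c cs' =>
    simp only []
    by_cases hk : correctChar c = true
    · rw [if_neg (by simp [hk]), wlMain_eq]
      have h := main_lemma (c :: cs').length (c :: cs') le_rfl ""
      rw [h]
      simp
    · have hk' : correctChar c = false := by simpa using hk
      rw [if_pos (by simp [hk']), wlMain_eq, wlWhile_eq_takeRun]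
      have htr : takeRun false (c :: cs')
          = (c :: (takeRun false cs').1, (takeRun false cs').2) := by
        simp [takeRun, hk']
      rw [htr]
      have h := main_lemma (takeRun false cs').2.length (takeRun false cs').2 le_rfl
        (String.mk (c :: (takeRun false cs').1))
      rw [h]
      have hwl : wlAlt (c :: cs')
          = (String.mk (c :: (takeRun false cs').1)) :: wlAlt (takeRun false cs').2 := by
        rw [wlAlt]
        simp [hk']
      rw [hwl, join_cons]
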